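-- pv_equiv track=rewrite | github.com/xiaotai-yang/tai_surf | ED/ladder_tool.py | ABC_single
-- ===== SOURCE A (Python) =====
-- def ABC_single(L, a):
--     B = {}
--     A = {a}
--     C = {}
--     for i in range (2*a+1, L-1):
--         B[i] = [2*i+1, 2*(i+1)]
--     for i in B:
--         if i!=2*a+1:
--             B[i]+=B[i-1]
--             B[i].sort()
--     for i in B:
--         C[i] = set(range(2*a, 2*L))-set(B[i])-A
--     return A, B, C
-- ===== SOURCE B (Python) =====
-- def ABC_single(L, a):
--     A = {a}
--     B = {}
--     C = {}
--     prefix = []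
--     for i in range(2 * a + 1, L - 1):
--         prefix = prefix + [2 * i + 1, 2 * i + 2]
--         B[i] = prefix
--         C[i] = set(range(2 * a, 2 * L)) - set(prefix) - A
--     return A, B, C
-- ===== Notes on version B (the rewrite author's own statement) =====
-- stated objective: faster
-- what changed: Single pass that appends the two new (always larger) elements to the growing sorted prefix instead of storing fresh pairs, re-reading the previous dict entry and re-sorting the whole cumulative list for every key in separate passes.
import Mathlib
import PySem

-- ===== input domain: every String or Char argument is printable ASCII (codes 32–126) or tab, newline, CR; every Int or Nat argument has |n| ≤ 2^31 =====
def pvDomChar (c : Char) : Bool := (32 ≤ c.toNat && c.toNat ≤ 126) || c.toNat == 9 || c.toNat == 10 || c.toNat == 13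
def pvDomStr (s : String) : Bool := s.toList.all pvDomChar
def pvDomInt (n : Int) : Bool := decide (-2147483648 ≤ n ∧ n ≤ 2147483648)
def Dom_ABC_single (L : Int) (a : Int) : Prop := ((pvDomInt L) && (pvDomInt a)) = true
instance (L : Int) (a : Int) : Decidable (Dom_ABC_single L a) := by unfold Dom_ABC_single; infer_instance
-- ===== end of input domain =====

-- B builds everything in one pass, appending the two new (always larger) elements to the
-- growing sorted prefix instead of A's per-key re-sort of the whole cumulative list;
-- equality of the return values is proved for all inputs.

-- ===== PORT A =====
def ABC_single (L : Int) (a : Int) : List Int × (List (Int × List Int)) × (List (Int × List Int)) :=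
  let A : PySem.Set Int := PySem.Set.ofList [a]
  let B0 : PySem.Dict Int (List Int) :=
    (PySem.List.pyRange (2*a+1) (L-1) 1).foldl
      (fun d i => d.insert i [2*i+1, 2*(i+1)]) PySem.Dict.empty
  let B1 : PySem.Dict Int (List Int) :=
    B0.keys.foldl (fun d i =>
      if i ≠ 2*a+1 then
        d.insert i (PySem.List.sorted (d.getD i [] ++ d.getD (i-1) []) (fun x => x) false)
      else d) B0
  let C : PySem.Dict Int (List Int) :=
    B1.keys.foldl (fun d i =>
      d.insert i (PySem.Set.diff (PySem.Set.diff
        (PySem.Set.ofList (PySem.List.pyRange (2*a) (2*L) 1))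
        (PySem.Set.ofList (B1.getD i []))) A)) PySem.Dict.empty
  (A, B1.items, C.items)

-- ===== PORT B =====
def ABC_single_alt (L : Int) (a : Int) : List Int × (List (Int × List Int)) × (List (Int × List Int)) :=
  let A : PySem.Set Int := PySem.Set.ofList [a]
  let r := (PySem.List.pyRange (2*a+1) (L-1) 1).foldl
    (fun (s : List Int × PySem.Dict Int (List Int) × PySem.Dict Int (List Int)) i =>
      let pre := s.1 ++ [2*i+1, 2*i+2]
      (pre, s.2.1.insert i pre,
        s.2.2.insert i (PySem.Set.diff (PySem.Set.diff
          (PySem.Set.ofList (PySem.List.pyRange (2*a) (2*L) 1))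
          (PySem.Set.ofList pre)) A)))
    ([], PySem.Dict.empty, PySem.Dict.empty)
  ([a], r.2.1.items, r.2.2.items)

-- ===== PRECONDITION & SPEC =====
def Spec_ABC_single (L : Int) (a : Int) (out : List Int × (List (Int × List Int)) × (List (Int × List Int))) : Prop := out = ABC_single_alt L a
instance (L : Int) (a : Int) (out : List Int × (List (Int × List Int)) × (List (Int × List Int))) : Decidable (Spec_ABC_single L a out) := by unfold Spec_ABC_single; infer_instance

-- ===== CLAIM (what is proved, stated in full; the proofs are below) =====
def Claim_equal_ABC_single : Prop := ∀ (L : Int) (a : Int), Dom_ABC_single L a → Spec_ABC_single L a (ABC_single L a)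

-- ===== LEMMAS AND PROOFS =====

-- cumulative sorted block for key i (closed form of both programs' dict values)
def pvVal (a i : Int) : List Int := PySem.List.pyRange (4*a+3) (2*i+3) 1
-- complement value for key i (closed form)
def pvCval (L a i : Int) : List Int :=
  (PySem.List.pyRange (2*a) (2*L) 1).filter
    (fun x => (decide (x < 4*a+3) || decide (2*i+2 < x)) && decide (x ≠ a))

theorem pvTwo (x : Int) : PySem.List.pyRange x (x+2) 1 = [x, x+1] := by
  rw [PySem.List.pyRange_one_cons (by omega)]
  have h : x + 2 = (x+1) + 1 := by ring
  rw [h, PySem.List.pyRange_one_singleton]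

-- folding fresh inserts over a nodup key list appends the pairs in order
theorem pvFoldInsert {ν : Type} (v : Int → ν) :
    ∀ (l : List Int) (p : List (Int × ν)), l.Nodup → (∀ i ∈ l, ∀ q ∈ p, q.1 ≠ i) →
    l.foldl (fun d i => d.insert i (v i)) (PySem.Dict.mk p)
      = PySem.Dict.mk (p ++ l.map fun i => (i, v i)) := by
  intro l
  induction l with
  | nil => intro p _ _; simp
  | cons i l ih =>
    intro p hn hd
    have hc : (PySem.Dict.mk p).contains i = false := by
      simp [PySem.Dict.contains_mk]
      intro a b hab
      exact fun h => (hd i (by simp) (a, b) hab) (by simpa using h)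
    have hins : (PySem.Dict.mk p).insert i (v i) = PySem.Dict.mk (p ++ [(i, v i)]) := by
      simp [PySem.Dict.insert, hc]
    simp only [List.foldl_cons, hins]
    rw [ih (p ++ [(i, v i)]) (by simpa using hn.of_cons)]
    · simp
    · intro j hj q hq
      rcases List.mem_append.mp hq with h1 | h2
      · exact hd j (by simp [hj]) q h1
      · simp at h2; subst h2; simp
        intro h; subst h; exact (List.nodup_cons.mp hn).1 hj

-- inserting at an existing (unique) key rewrites that pair in place
theorem pvInsertMid {ν : Type} (p q : List (Int × ν)) (m : Int) (v w : ν)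
    (hp : ∀ r ∈ p, r.1 ≠ m) (hq : ∀ r ∈ q, r.1 ≠ m) :
    (PySem.Dict.mk (p ++ (m, v) :: q)).insert m w = PySem.Dict.mk (p ++ (m, w) :: q) := by
  have hc : (PySem.Dict.mk (p ++ (m, v) :: q)).contains m = true := by
    simp [PySem.Dict.contains_mk]
  simp only [PySem.Dict.insert, hc, if_true]
  congr 1
  rw [List.map_append, List.map_cons]
  simp only [BEq.rfl, if_true]
  have h1 : (p.map fun r => if (r.1 == m) = true then (m, w) else r) = p.map id :=
    List.map_congr_left (fun r hr => by simp [hp r hr])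
  have h2 : (q.map fun r => if (r.1 == m) = true then (m, w) else r) = q.map id :=
    List.map_congr_left (fun r hr => by simp [hq r hr])
  rw [h1, h2, List.map_id, List.map_id]

-- inserting a key absent from the items appends the pair
theorem pvInsertFresh {ν : Type} (p : List (Int × ν)) (m : Int) (v : ν)
    (hp : ∀ r ∈ p, r.1 ≠ m) :
    (PySem.Dict.mk p).insert m v = PySem.Dict.mk (p ++ [(m, v)]) := by
  have hc : (PySem.Dict.mk p).contains m = false := by
    simp [PySem.Dict.contains_mk]
    intro x y hxy
    exact fun h => (hp (x, y) hxy) (by simpa using h)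
  simp [PySem.Dict.insert, hc]

-- sorting the two fresh (larger) elements into the previous block extends it
theorem pvSorted (a m : Int) (h : 2*a+1 ≤ m) :
    PySem.List.sorted ([2*m+1, 2*(m+1)] ++ pvVal a (m-1)) (fun x => x) false = pvVal a m := by
  have e1 : pvVal a m = pvVal a (m-1) ++ [2*m+1, 2*(m+1)] := by
    unfold pvVal
    have h1 : (2*(m-1)+3 : Int) = 2*m+1 := by ring
    have h2 : (2*m+3 : Int) = (2*m+1)+2 := by ring
    have h3 : (2*(m+1) : Int) = (2*m+1)+1 := by ring
    rw [h1, h2, h3,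
      PySem.List.pyRange_one_append (4*a+3) (2*m+1) ((2*m+1)+2) (by omega) (by omega), pvTwo]
  apply PySem.List.sorted_eq_of_perm_of_pairwise_lt
  · rw [e1]; exact List.perm_append_comm
  · rw [e1, ← e1]
    unfold pvVal
    exact PySem.List.pairwise_lt_pyRange_one _ _

-- A's second loop turns the fresh pairs into cumulative sorted blocks
theorem pvLoop2 (L a : Int) : ∀ (n : Nat) (m : Int), 2*a+1 ≤ m → L-1 = m + n →
    (PySem.List.pyRange m (L-1) 1).foldl
      (fun d i => if i ≠ 2*a+1 then
          d.insert i (PySem.List.sorted (d.getD i [] ++ d.getD (i-1) []) (fun x => x) false)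
        else d)
      (PySem.Dict.mk (((PySem.List.pyRange (2*a+1) m 1).map fun i => (i, pvVal a i))
        ++ ((PySem.List.pyRange m (L-1) 1).map fun i => (i, [2*i+1, 2*(i+1)]))))
    = PySem.Dict.mk ((PySem.List.pyRange (2*a+1) (L-1) 1).map fun i => (i, pvVal a i)) := by
  intro n
  induction n with
  | zero =>
    intro m h1 h2
    have hm : L - 1 = m := by omega
    rw [← hm] at *
    rw [PySem.List.pyRange_one_eq_nil (le_refl _)]
    simp
  | succ n ih =>
    intro m h1 h2
    have hlt : m < L - 1 := by omega
    rw [PySem.List.pyRange_one_cons hlt]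
    simp only [List.map_cons, List.foldl_cons]
    by_cases hm : m = 2*a+1
    · rw [if_neg (by simp [hm])]
      have hr0 : PySem.List.pyRange (2*a+1) m 1 = [] :=
        PySem.List.pyRange_one_eq_nil (by omega)
      have hr1 : PySem.List.pyRange (2*a+1) (m+1) 1 = [m] := by
        rw [PySem.List.pyRange_one_succ_right h1, hr0]; simp
      have hv : pvVal a m = [2*m+1, 2*(m+1)] := by
        unfold pvVal
        have e1 : (4*a+3 : Int) = 2*m+1 := by omega
        have e2 : (2*m+3 : Int) = (2*m+1)+2 := by ring
        have e3 : (2*(m+1) : Int) = (2*m+1)+1 := by ring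
        rw [e1, e2, e3, pvTwo]
      have := ih (m+1) (by omega) (by omega)
      rw [hr1] at this
      rw [hr0]
      simpa [hv] using this
    · rw [if_pos (by exact hm)]
      set A := (PySem.List.pyRange (2*a+1) m 1).map (fun i => (i, pvVal a i)) with hA
      set rest := (PySem.List.pyRange (m+1) (L-1) 1).map (fun i => (i, [2*i+1, 2*(i+1)])) with hrest
      set d := PySem.Dict.mk (A ++ (m, [2*m+1, 2*(m+1)]) :: rest) with hd
      have hkeys : d.keys = PySem.List.pyRange (2*a+1) (L-1) 1 := by
        rw [hd, PySem.Dict.keys_mk, List.map_append, List.map_cons, List.map_map, List.map_map]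
        show (PySem.List.pyRange (2*a+1) m 1).map _ ++ m :: (PySem.List.pyRange (m+1) (L-1) 1).map _ = _
        rw [show ((fun x => x.1) ∘ fun i => ((i : Int), pvVal a i)) = id from rfl,
            show ((fun x => x.1) ∘ fun i => ((i : Int), [2*i+1, 2*(i+1)])) = id from rfl,
            List.map_id, List.map_id,
            ← PySem.List.pyRange_one_cons hlt,
            ← PySem.List.pyRange_one_append (2*a+1) m (L-1) h1 (by omega)]
      have hnd : d.keys.Nodup := by rw [hkeys]; exact PySem.List.nodup_pyRange_one _ _
      have hg1 : d.getD m [] = [2*m+1, 2*(m+1)] :=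
        PySem.Dict.getD_of_mem_items d (by rw [hd]; simp) hnd []
      have hg2 : d.getD (m-1) [] = pvVal a (m-1) := by
        apply PySem.Dict.getD_of_mem_items d _ hnd []
        rw [hd]
        apply List.mem_append.mpr
        left
        rw [hA]
        exact List.mem_map.mpr ⟨m-1, PySem.List.mem_pyRange_one.mpr ⟨by omega, by omega⟩, rfl⟩
      rw [hg1, hg2, pvSorted a m h1]
      have hins : d.insert m (pvVal a m) = PySem.Dict.mk (A ++ (m, pvVal a m) :: rest) := by
        rw [hd]
        apply pvInsertMid
        · intro r hr
          rw [hA] at hr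
          rcases List.mem_map.mp hr with ⟨j, hj, rfl⟩
          have := PySem.List.mem_pyRange_one.mp hj
          simp; omega
        · intro r hr
          rw [hrest] at hr
          rcases List.mem_map.mp hr with ⟨j, hj, rfl⟩
          have := PySem.List.mem_pyRange_one.mp hj
          simp; omega
      rw [hins]
      have hstep : A ++ (m, pvVal a m) :: rest
          = ((PySem.List.pyRange (2*a+1) (m+1) 1).map fun i => (i, pvVal a i)) ++ rest := by
        rw [PySem.List.pyRange_one_succ_right h1, List.map_append, hA]
        simp
      rw [hstep]
      exact ih (m+1) (by omega) (by omega)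

-- A's complement value equals the arithmetic filter
theorem pvWval (L a i : Int) :
    PySem.Set.diff (PySem.Set.diff
      (PySem.Set.ofList (PySem.List.pyRange (2*a) (2*L) 1))
      (PySem.Set.ofList (pvVal a i))) (PySem.Set.ofList [a]) = pvCval L a i := by
  rw [PySem.Set.ofList_eq_self_of_nodup _ (PySem.List.nodup_pyRange_one _ _),
      PySem.Set.ofList_eq_self_of_nodup _ (by exact PySem.List.nodup_pyRange_one _ _ : (pvVal a i).Nodup),
      PySem.Set.ofList_eq_self_of_nodup [a] (List.nodup_singleton a)]
  simp only [PySem.Set.diff, List.filter_filter]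
  apply List.filter_congr
  intro x hx
  simp [pvVal, PySem.List.mem_pyRange_one]
  rw [Bool.eq_iff_iff]
  simp
  omega

-- B's single pass, closed form
theorem pvLoopB (L a : Int) : ∀ (n : Nat) (m : Int), 2*a+1 ≤ m → L-1 = m + n →
    (PySem.List.pyRange m (L-1) 1).foldl
      (fun (s : List Int × PySem.Dict Int (List Int) × PySem.Dict Int (List Int)) i =>
        let pre := s.1 ++ [2*i+1, 2*i+2]
        (pre, s.2.1.insert i pre,
          s.2.2.insert i (PySem.Set.diff (PySem.Set.diff
            (PySem.Set.ofList (PySem.List.pyRange (2*a) (2*L) 1))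
            (PySem.Set.ofList pre)) (PySem.Set.ofList [a]))))
      (PySem.List.pyRange (4*a+3) (2*m+1) 1,
        PySem.Dict.mk ((PySem.List.pyRange (2*a+1) m 1).map fun i => (i, pvVal a i)),
        PySem.Dict.mk ((PySem.List.pyRange (2*a+1) m 1).map fun i => (i, pvCval L a i)))
    = (PySem.List.pyRange (4*a+3) (2*(L-1)+1) 1,
        PySem.Dict.mk ((PySem.List.pyRange (2*a+1) (L-1) 1).map fun i => (i, pvVal a i)),
        PySem.Dict.mk ((PySem.List.pyRange (2*a+1) (L-1) 1).map fun i => (i, pvCval L a i))) := by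
  intro n
  induction n with
  | zero =>
    intro m h1 h2
    have hm : L - 1 = m := by omega
    rw [← hm] at *
    rw [PySem.List.pyRange_one_eq_nil (le_refl _)]
    simp
  | succ n ih =>
    intro m h1 h2
    have hlt : m < L - 1 := by omega
    rw [PySem.List.pyRange_one_cons hlt, List.foldl_cons]
    have hpre : PySem.List.pyRange (4*a+3) (2*m+1) 1 ++ [2*m+1, 2*m+2] = pvVal a m := by
      unfold pvVal
      have e2 : (2*m+3 : Int) = (2*m+1)+2 := by ring
      have e3 : (2*m+2 : Int) = (2*m+1)+1 := by ring
      rw [e2, e3,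
        PySem.List.pyRange_one_append (4*a+3) (2*m+1) ((2*m+1)+2) (by omega) (by omega), pvTwo]
    have hfresh : ∀ (f : Int → List Int) (r : Int × List Int),
        r ∈ (PySem.List.pyRange (2*a+1) m 1).map (fun i => (i, f i)) → r.1 ≠ m := by
      intro f r hr
      rcases List.mem_map.mp hr with ⟨j, hj, rfl⟩
      have := PySem.List.mem_pyRange_one.mp hj
      simp; omega
    simp only
    rw [hpre, pvInsertFresh _ _ _ (hfresh _), pvInsertFresh _ _ _ (hfresh _), pvWval L a m]
    have hstep : ∀ (f : Int → List Int),
        ((PySem.List.pyRange (2*a+1) m 1).map fun i => (i, f i)) ++ [(m, f m)]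
          = (PySem.List.pyRange (2*a+1) (m+1) 1).map fun i => (i, f i) := by
      intro f
      rw [PySem.List.pyRange_one_succ_right h1, List.map_append]
      simp
    rw [hstep (fun i => pvVal a i), hstep (fun i => pvCval L a i),
        show pvVal a m = PySem.List.pyRange (4*a+3) (2*(m+1)+1) 1 from by unfold pvVal; congr 1; ring]
    exact ih (m+1) (by omega) (by omega)

-- ===== VERDICT (by name: the statement is the Claim_ definition above) =====
theorem ABC_single_spec : Claim_equal_ABC_single := by
  intro L a _
  unfold Spec_ABC_single ABC_single ABC_single_alt
  by_cases hE : L - 1 <= 2*a+1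
  · rw [PySem.List.pyRange_one_eq_nil hE]
    simp [PySem.Set.ofList_eq_self_of_nodup [a] (List.nodup_singleton a), PySem.Dict.empty]
  · push Not at hE
    have h2a : 0 ≤ L - 1 - (2*a+1) := by omega
    obtain ⟨n, hn⟩ : ∃ n : Nat, L - 1 = (2*a+1) + (n : Int) :=
      ⟨(L - 1 - (2*a+1)).toNat, by omega⟩
    have hnodup := PySem.List.nodup_pyRange_one (2*a+1) (L-1)
    -- loop 1 of A
    have hB0 := pvFoldInsert (fun i => [2*i+1, 2*(i+1)]) (PySem.List.pyRange (2*a+1) (L-1) 1) []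
      hnodup (by simp)
    simp only [List.nil_append] at hB0
    have hkeys1 : (PySem.Dict.mk ((PySem.List.pyRange (2*a+1) (L-1) 1).map
        fun i => (i, [2*i+1, 2*(i+1)]))).keys = PySem.List.pyRange (2*a+1) (L-1) 1 := by
      rw [PySem.Dict.keys_mk, List.map_map,
          show ((fun x => x.1) ∘ fun i => ((i : Int), [2*i+1, 2*(i+1)])) = id from rfl, List.map_id]
    -- loop 2 of A
    have hL2 := pvLoop2 L a n (2*a+1) le_rfl hn
    rw [PySem.List.pyRange_one_eq_nil (le_refl (2*a+1))] at hL2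
    simp only [List.map_nil, List.nil_append] at hL2
    have hkeys2 : (PySem.Dict.mk ((PySem.List.pyRange (2*a+1) (L-1) 1).map
        fun i => (i, pvVal a i))).keys = PySem.List.pyRange (2*a+1) (L-1) 1 := by
      rw [PySem.Dict.keys_mk, List.map_map,
          show ((fun x => x.1) ∘ fun i => ((i : Int), pvVal a i)) = id from rfl, List.map_id]
    -- loop 3 of A
    have hC := pvFoldInsert (fun i =>
        ((PySem.Set.ofList (PySem.List.pyRange (2*a) (2*L) 1)).diff
          (PySem.Set.ofList ((PySem.Dict.mk ((PySem.List.pyRange (2*a+1) (L-1) 1).map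
            fun i => (i, pvVal a i))).getD i []))).diff (PySem.Set.ofList [a]))
      (PySem.List.pyRange (2*a+1) (L-1) 1) [] hnodup (by simp)
    simp only [List.nil_append] at hC
    have hCitems : ((PySem.List.pyRange (2*a+1) (L-1) 1).map fun i =>
        (i, ((PySem.Set.ofList (PySem.List.pyRange (2*a) (2*L) 1)).diff
          (PySem.Set.ofList ((PySem.Dict.mk ((PySem.List.pyRange (2*a+1) (L-1) 1).map
            fun i => (i, pvVal a i))).getD i []))).diff (PySem.Set.ofList [a])))
        = (PySem.List.pyRange (2*a+1) (L-1) 1).map fun i => (i, pvCval L a i) := by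
      apply List.map_congr_left
      intro i hi
      have hg : (PySem.Dict.mk ((PySem.List.pyRange (2*a+1) (L-1) 1).map
          fun i => (i, pvVal a i))).getD i [] = pvVal a i := by
        have hmem : ((i, pvVal a i) : Int × List Int) ∈ (PySem.Dict.mk
            ((PySem.List.pyRange (2*a+1) (L-1) 1).map fun i => (i, pvVal a i))).items :=
          List.mem_map.mpr ⟨i, hi, rfl⟩
        exact PySem.Dict.getD_of_mem_items _ hmem (by rw [hkeys2]; exact hnodup) []
      rw [hg, pvWval]
    -- B's loop
    have hLB := pvLoopB L a n (2*a+1) le_rfl hn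
    rw [show (2*(2*a+1)+1 : Int) = 4*a+3 from by ring,
        PySem.List.pyRange_one_eq_nil (le_refl (4*a+3)),
        PySem.List.pyRange_one_eq_nil (le_refl (2*a+1))] at hLB
    simp only [List.map_nil] at hLB
    -- assemble
    simp only [show (PySem.Dict.empty : PySem.Dict Int (List Int)) = PySem.Dict.mk [] from rfl,
      hB0, hkeys1, hL2, hkeys2, hC, hLB, hCitems]
    rw [PySem.Set.ofList_eq_self_of_nodup [a] (List.nodup_singleton a)]
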